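-- pv_equiv track=rewrite | github.com/Radcliffe/OEIS-Python | src/oeispy/A365/A365876.py | A365876
-- ===== SOURCE A (Python) =====
-- from math import gcd
--
-- def A365876(n):
--     if n == 1: return 1
--     c = 0
--     for v in range(1,n+1>>1):
--         u = n-(v<<1)
--         if gcd(u,v)==1:
--             v2, u2 = v*v, v*(u<<2)
--             if v2+u2 >= 0:
--                 c +=1
--             if v2-u2 >= 0:
--                 c +=1
--     return c # _Chai Wah Wu_, Oct 04 2023
-- ===== SOURCE B (Python) =====
-- from math import isqrt
--
-- def A365876(n):
--     if n == 1:
--         return 1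
--     if n <= 2:
--         return 0
--     # distinct prime factors of n by trial division up to isqrt(n)
--     primes = []
--     m = n
--     for d in range(2, isqrt(n) + 1):
--         if m % d == 0:
--             primes.append(d)
--             while m % d == 0:
--                 m //= d
--     if m > 1:
--         primes.append(m)
--
--     def cop(x, ps):
--         # count of v in [1, x] divisible by no element of ps (inclusion-exclusion)
--         if x <= 0:
--             return 0
--         if not ps:
--             return x
--         return cop(x, ps[1:]) - cop(x // ps[0], ps[1:])
--
--     hi = (n - 1) // 2
--     return 2 * cop(hi, primes) - cop((4 * n - 1) // 9, primes)
-- ===== Notes on version B (the rewrite author's own statement) =====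
-- stated objective: faster
-- what changed: Instead of scanning every candidate v below half of n and testing gcd per candidate, B factors n once by trial division and counts the coprime v in the two relevant integer ranges in closed form by inclusion-exclusion over the distinct prime factors of n (the loop's sign conditions reduce to range conditions on v).
import Mathlib
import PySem

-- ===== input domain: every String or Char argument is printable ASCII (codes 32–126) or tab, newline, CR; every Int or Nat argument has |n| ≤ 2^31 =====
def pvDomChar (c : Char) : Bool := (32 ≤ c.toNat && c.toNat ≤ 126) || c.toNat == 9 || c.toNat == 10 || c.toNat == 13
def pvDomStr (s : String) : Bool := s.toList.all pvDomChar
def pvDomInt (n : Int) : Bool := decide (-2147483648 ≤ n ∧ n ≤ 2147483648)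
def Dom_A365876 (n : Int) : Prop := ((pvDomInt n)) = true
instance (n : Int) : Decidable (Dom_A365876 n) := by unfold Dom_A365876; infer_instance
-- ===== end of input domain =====

-- B replaces A's O(n) gcd loop by trial-division factoring of n plus an
-- inclusion-exclusion count of coprime residues in two integer ranges (faster, measured).


-- ===== PORT A =====
def A365876 (n : Int) : Int :=
  if n = 1 then 1
  else
    -- for v in range(1, n+1>>1): …   (n+1>>1 is floor division by 2)
    (PySem.List.pyRange 1 ((n+1) >>> (1:Nat)) 1).foldl
      (fun (c v : Int) =>
        let u := n - (v <<< (1:Nat))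
        if Int.gcd u v = 1 then
          let v2 := v * v
          let u2 := v * (u <<< (2:Nat))
          let c := if v2 + u2 ≥ 0 then c + 1 else c
          if v2 - u2 ≥ 0 then c + 1 else c
        else c) 0

-- ===== PORT B =====
-- inner 'while m % d == 0: m //= d'. The guard's extra '0 < m ∧ 2 ≤ d' only makes the
-- recursion total (Python would loop forever there; unreachable in B's execution).
def stripFactor (m d : Int) : Int :=
  if h : 0 < m ∧ 2 ≤ d ∧ PySem.Int.mod m d = 0 then stripFactor (PySem.Int.floordiv m d) d else m
termination_by m.toNat
decreasing_by
  rcases h with ⟨hm, hd, _⟩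
  rw [PySem.Int.floordiv_eq_ediv_of_pos (by omega)]
  have h0 : 0 ≤ m / d := Int.ediv_nonneg hm.le (by omega)
  have h1 : d * (m / d) + m % d = m := Int.mul_ediv_add_emod m d
  have h2 : 0 ≤ m % d := Int.emod_nonneg m (by omega)
  have h3 : m / d < m := by nlinarith
  omega

-- for d in range(2, isqrt(n)+1): if m % d == 0: primes.append(d); while …: m //= d
-- (math.isqrt(n) = Nat.sqrt n.toNat, exact for n ≥ 0)
def factorLoop (n : Int) : List Int × Int :=
  (PySem.List.pyRange 2 ((Nat.sqrt n.toNat : Int) + 1) 1).foldl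
    (fun st d =>
      if PySem.Int.mod st.2 d = 0 then (st.1 ++ [d], stripFactor st.2 d) else st)
    ([], n)

-- def cop(x, ps): count of v in [1,x] divisible by no element of ps
def cop (x : Int) (ps : List Int) : Int :=
  if x ≤ 0 then 0
  else
    match ps with
    | [] => x
    | p :: rest => cop x rest - cop (PySem.Int.floordiv x p) rest

def A365876_alt (n : Int) : Int :=
  if n = 1 then 1
  else if n ≤ 2 then 0
  else
    let fm := factorLoop n
    let primes := if fm.2 > 1 then fm.1 ++ [fm.2] else fm.1
    let hi := PySem.Int.floordiv (n - 1) 2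
    2 * cop hi primes - cop (PySem.Int.floordiv (4 * n - 1) 9) primes

-- ===== PRECONDITION & SPEC =====
def Spec_A365876 (n : Int) (out : Int) : Prop := out = A365876_alt n
instance (n : Int) (out : Int) : Decidable (Spec_A365876 n out) := by unfold Spec_A365876; infer_instance

-- ===== CLAIM (what is proved, stated in full; the proofs are below) =====
def Claim_equal_A365876 : Prop := ∀ (n : Int), Dom_A365876 n → Spec_A365876 n (A365876 n)

-- ===== LEMMAS AND PROOFS =====

def iccZ (a b : Int) : Finset Int := (Finset.range (b + 1 - a).toNat).image (fun k : Nat => a + (k : Int))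
lemma iccZ_eq (a b : Int) : iccZ a b = Finset.Icc a b := by
  ext v
  simp only [iccZ, Finset.mem_image, Finset.mem_range, Finset.mem_Icc]
  constructor
  · rintro ⟨k, hk, rfl⟩; omega
  · intro h; exact ⟨(v - a).toNat, by omega, by omega⟩
def cntF (P : List Int) (x : Int) : Int :=
  (((iccZ 1 x).filter (fun v => ∀ p ∈ P, ¬ p ∣ v)).card : Int)
lemma cntF_nil (x : Int) : cntF [] x = max x 0 := by
  simp only [cntF, iccZ_eq, List.not_mem_nil, false_implies, implies_true, Finset.filter_true]
  rw [Int.card_Icc]; omega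

lemma cnt_dvd_card (p : Int) (hp : 0 < p) (rest : List Int)
    (hco : ∀ q ∈ rest, IsCoprime q p) (x : Int) :
    ((Finset.Icc 1 x).filter (fun v => p ∣ v ∧ ∀ q ∈ rest, ¬ q ∣ v)).card
      = ((Finset.Icc 1 (x / p)).filter (fun v => ∀ q ∈ rest, ¬ q ∣ v)).card := by
  apply Finset.card_bij' (fun v _ => v / p) (fun w _ => p * w)
  · intro v hv
    simp only [Finset.mem_filter, Finset.mem_Icc] at hv ⊢
    obtain ⟨⟨h1, h2⟩, ⟨w, rfl⟩, hq⟩ := hv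
    have hw1 : 1 ≤ w := by nlinarith
    rw [Int.mul_ediv_cancel_left w (by omega)]
    refine ⟨⟨hw1, ?_⟩, ?_⟩
    · rw [Int.le_ediv_iff_mul_le hp]; nlinarith
    · intro q hqr hdvd
      exact hq q hqr (hdvd.mul_left p)
  · intro w hw
    simp only [Finset.mem_filter, Finset.mem_Icc] at hw ⊢
    obtain ⟨⟨h1, h2⟩, hq⟩ := hw
    rw [Int.le_ediv_iff_mul_le hp] at h2
    refine ⟨⟨by nlinarith, by nlinarith⟩, ⟨w, rfl⟩, ?_⟩
    intro q hqr hdvd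
    exact hq q hqr ((hco q hqr).dvd_of_dvd_mul_left hdvd)
  · intro v hv
    simp only [Finset.mem_filter, Finset.mem_Icc] at hv
    obtain ⟨_, ⟨w, rfl⟩, _⟩ := hv
    rw [Int.mul_ediv_cancel_left w (by omega)]
  · intro w hw
    rw [Int.mul_ediv_cancel_left w (by omega)]

lemma cnt_split (p : Int) (rest : List Int) (x : Int) :
    cntF (p :: rest) x
      = cntF rest x
        - (((Finset.Icc 1 x).filter (fun v => p ∣ v ∧ ∀ q ∈ rest, ¬ q ∣ v)).card : Int) := by
  simp only [cntF, iccZ_eq]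
  have h := Finset.card_filter_add_card_filter_not
    (s := (Finset.Icc 1 x).filter (fun v => ∀ q ∈ rest, ¬ q ∣ v)) (p := fun v => p ∣ v)
  rw [Finset.filter_filter, Finset.filter_filter] at h
  have e1 : ((Finset.Icc 1 x).filter fun v => (∀ q ∈ rest, ¬ q ∣ v) ∧ p ∣ v)
      = (Finset.Icc 1 x).filter (fun v => p ∣ v ∧ ∀ q ∈ rest, ¬ q ∣ v) := by
    apply Finset.filter_congr; intro v _; simp [and_comm]
  have e2 : ((Finset.Icc 1 x).filter fun v => (∀ q ∈ rest, ¬ q ∣ v) ∧ ¬ p ∣ v)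
      = (Finset.Icc 1 x).filter (fun v => ∀ q ∈ p :: rest, ¬ q ∣ v) := by
    apply Finset.filter_congr; intro v _
    simp [and_comm]
  rw [e1, e2] at h
  omega

lemma cntF_nonpos (P : List Int) (x : Int) (hx : x ≤ 0) : cntF P x = 0 := by
  simp only [cntF, iccZ_eq]
  rw [Finset.Icc_eq_empty (by omega)]
  simp

lemma cop_eq_cntF (P : List Int) (hP : ∀ p ∈ P, 0 < p)
    (hco : P.Pairwise (fun a b => IsCoprime a b)) :
    ∀ x : Int, cop x P = cntF P x := by
  induction P with
  | nil =>
    intro x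
    rw [cop, cntF_nil]
    split <;> omega
  | cons p rest ih =>
    intro x
    rw [cop]
    by_cases hx : x ≤ 0
    · rw [if_pos hx, cntF_nonpos _ _ hx]
    · rw [if_neg hx]
      have hp : 0 < p := hP p (List.mem_cons_self ..)
      have hrest : ∀ q ∈ rest, 0 < q := fun q hq => hP q (List.mem_cons_of_mem _ hq)
      have hcos : ∀ q ∈ rest, IsCoprime q p := by
        intro q hq
        exact (List.pairwise_cons.mp hco).1 q hq |>.symm
      have hco' := (List.pairwise_cons.mp hco).2
      rw [ih hrest hco', ih hrest hco',
        PySem.Int.floordiv_eq_ediv_of_pos hp,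
        cnt_split p rest x, cnt_dvd_card p hp rest hcos x]
      simp only [cntF, iccZ_eq]

-- factorization side
lemma int_pos_prime_two_le (q : Int) (hq : Prime q) (h0 : 0 < q) : 2 ≤ q := by
  have h := Int.prime_iff_natAbs_prime.mp hq
  have := h.two_le
  omega

lemma stripFactor_spec_aux : ∀ (N : Nat) (m d : Int), m.toNat ≤ N → 0 < m → 2 ≤ d →
    ∃ k : Nat, m = d ^ k * stripFactor m d ∧ ¬ d ∣ stripFactor m d ∧ 0 < stripFactor m d := by
  intro N
  induction N with
  | zero => intro m d h hm hd; omega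
  | succ N ih =>
    intro m d h hm hd
    by_cases hdm : PySem.Int.mod m d = 0
    · have hdvd : d ∣ m := (PySem.Int.mod_eq_zero_iff_dvd m d).mp hdm
      rw [stripFactor, dif_pos ⟨hm, hd, hdm⟩, PySem.Int.floordiv_eq_ediv_of_pos (by omega)]
      have h1 : 1 ≤ m / d := by
        rw [Int.le_ediv_iff_mul_le (by omega)]
        have := Int.le_of_dvd hm hdvd
        omega
      have hlt : m / d < m := by
        have h0 : 0 ≤ m / d := Int.ediv_nonneg hm.le (by omega)
        have h1' : d * (m / d) + m % d = m := Int.mul_ediv_add_emod m d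
        have h2 : 0 ≤ m % d := Int.emod_nonneg m (by omega)
        nlinarith
      obtain ⟨k, hk, hnd, hpos⟩ := ih (m / d) d (by omega) (by omega) hd
      refine ⟨k + 1, ?_, hnd, hpos⟩
      have hmd : d * (m / d) = m := Int.mul_ediv_cancel' hdvd
      rw [pow_succ]
      nlinarith [hk]
    · rw [stripFactor, dif_neg (fun hc => hdm hc.2.2)]
      exact ⟨0, by simp, fun hc => hdm ((PySem.Int.mod_eq_zero_iff_dvd m d).mpr hc), hm⟩

lemma stripFactor_spec (m d : Int) (hm : 0 < m) (hd : 2 ≤ d) :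
    ∃ k : Nat, m = d ^ k * stripFactor m d ∧ ¬ d ∣ stripFactor m d ∧ 0 < stripFactor m d :=
  stripFactor_spec_aux m.toNat m d le_rfl hm hd

def FactInv (n d : Int) (st : List Int × Int) : Prop :=
  0 < st.2 ∧ st.2 ∣ n ∧
  (∀ q : Int, Prime q → 0 < q → q ∣ st.2 → d ≤ q) ∧
  (∀ q : Int, Prime q → 0 < q → q ∣ n → d ≤ q → q ∣ st.2) ∧
  (∀ p : Int, p ∈ st.1 ↔ Prime p ∧ 0 < p ∧ p ∣ n ∧ p < d) ∧
  st.1.Pairwise (· < ·)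

lemma factStep (n d : Int) (st : List Int × Int) (hd : 2 ≤ d) (h : FactInv n d st) :
    FactInv n (d + 1)
      (if PySem.Int.mod st.2 d = 0 then (st.1 ++ [d], stripFactor st.2 d) else st) := by
  obtain ⟨hm0, hmn, hbig, hfind, hmem, hpw⟩ := h
  by_cases hdm : PySem.Int.mod st.2 d = 0
  · rw [if_pos hdm]
    have hdvd : d ∣ st.2 := (PySem.Int.mod_eq_zero_iff_dvd _ d).mp hdm
    -- d is prime
    have hdprime : Prime d := by
      obtain ⟨q, hqp, hqd⟩ := Nat.exists_prime_and_dvd (n := d.natAbs) (by omega)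
      have hqd' : (q : Int) ∣ d := by
        have : (q : Int) ∣ (d.natAbs : Int) := Int.natCast_dvd_natCast.mpr hqd
        rwa [Int.natAbs_of_nonneg (by omega)] at this
      have hqm : (q : Int) ∣ st.2 := hqd'.trans hdvd
      have hge : d ≤ (q : Int) :=
        hbig q (Int.prime_iff_natAbs_prime.mpr (by simpa using hqp)) (by exact_mod_cast hqp.pos) hqm
      have hle : (q : Int) ≤ d := Int.le_of_dvd (by omega) hqd'
      have : (q : Int) = d := le_antisymm hle hge
      rw [← this]
      exact Int.prime_iff_natAbs_prime.mpr (by simpa using hqp)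
    obtain ⟨k, hk, hnd, hpos⟩ := stripFactor_spec st.2 d hm0 hd
    have hdivm : stripFactor st.2 d ∣ st.2 := ⟨d ^ k, by rw [mul_comm]; exact hk⟩
    refine ⟨hpos, hdivm.trans hmn, ?_, ?_, ?_, ?_⟩
    · intro q hq hq0 hqdvd
      have : d ≤ q := hbig q hq hq0 (hqdvd.trans hdivm)
      rcases eq_or_lt_of_le this with heq | hlt
      · exact absurd (heq ▸ hqdvd) hnd
      · omega
    · intro q hq hq0 hqn hdq
      have hqm : q ∣ st.2 := hfind q hq hq0 hqn (by omega)
      rw [hk] at hqm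
      rcases hq.dvd_or_dvd hqm with hqk | hqs
      · have : q ∣ d := hq.dvd_of_dvd_pow hqk
        have : q ≤ d := Int.le_of_dvd (by omega) this
        omega
      · exact hqs
    · intro p
      simp only [List.mem_append, List.mem_singleton, hmem]
      constructor
      · rintro (⟨h1, h2, h3, h4⟩ | rfl)
        · exact ⟨h1, h2, h3, by omega⟩
        · exact ⟨hdprime, by omega, hdvd.trans hmn, by omega⟩
      · rintro ⟨h1, h2, h3, h4⟩
        by_cases hpd : p = d
        · right; exact hpd
        · left; exact ⟨h1, h2, h3, by omega⟩
    · rw [List.pairwise_append]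
      refine ⟨hpw, List.pairwise_singleton _ _, ?_⟩
      intro a ha b hb
      rw [List.mem_singleton] at hb
      subst hb
      exact ((hmem a).mp ha).2.2.2
  · rw [if_neg hdm]
    have hndvd : ¬ d ∣ st.2 := fun hc => hdm ((PySem.Int.mod_eq_zero_iff_dvd _ d).mpr hc)
    refine ⟨hm0, hmn, ?_, ?_, ?_, hpw⟩
    · intro q hq hq0 hqdvd
      have := hbig q hq hq0 hqdvd
      rcases eq_or_lt_of_le this with heq | hlt
      · exact absurd (heq ▸ hqdvd) hndvd
      · omega
    · intro q hq hq0 hqn hdq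
      exact hfind q hq hq0 hqn (by omega)
    · intro p
      rw [hmem]
      constructor
      · rintro ⟨h1, h2, h3, h4⟩; exact ⟨h1, h2, h3, by omega⟩
      · rintro ⟨h1, h2, h3, h4⟩
        refine ⟨h1, h2, h3, ?_⟩
        by_cases hpd : p = d
        · subst hpd
          exact absurd (hfind p h1 h2 h3 le_rfl) hndvd
        · omega

lemma factLoop_inv (n : Int) : ∀ (k : Nat) (a : Int) (st : List Int × Int), 2 ≤ a →
    FactInv n a st →
    FactInv n (a + k)
      ((PySem.List.pyRange a (a + k) 1).foldl
        (fun st d => if PySem.Int.mod st.2 d = 0 then (st.1 ++ [d], stripFactor st.2 d) else st)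
        st) := by
  intro k
  induction k with
  | zero =>
    intro a st ha h
    rw [PySem.List.pyRange_one_eq_nil (by omega)]
    simpa using h
  | succ k ih =>
    intro a st ha h
    have : (a + (k + 1 : Nat)) = (a + k) + 1 := by push_cast; ring
    rw [this, PySem.List.pyRange_one_succ_right (by omega), List.foldl_append]
    simp only [List.foldl_cons, List.foldl_nil]
    exact factStep n (a + k) _ (by omega) (ih a st ha h)

def plist (n : Int) : List Int :=
  if (factorLoop n).2 > 1 then (factorLoop n).1 ++ [(factorLoop n).2] else (factorLoop n).1

lemma primes_coprime (a b : Int) (ha : Prime a) (hb : Prime b)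
    (h0a : 0 < a) (h0b : 0 < b) (hne : a ≠ b) : IsCoprime a b := by
  rw [Int.isCoprime_iff_gcd_eq_one]
  have hne' : a.natAbs ≠ b.natAbs := by omega
  exact (Nat.coprime_primes (Int.prime_iff_natAbs_prime.mp ha)
    (Int.prime_iff_natAbs_prime.mp hb)).mpr hne'

lemma factorLoop_inv (n : Int) (hn : 3 ≤ n) :
    FactInv n ((Nat.sqrt n.toNat : Int) + 1) (factorLoop n) := by
  have hs : 1 ≤ (Nat.sqrt n.toNat : Int) := by
    have : 1 ≤ Nat.sqrt n.toNat := by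
      rw [Nat.le_sqrt]
      omega
    omega
  have hinit : FactInv n 2 ([], n) := by
    refine ⟨by omega, dvd_refl n, ?_, fun q _ _ hq _ => hq, ?_, List.Pairwise.nil⟩
    · intro q hq hq0 _
      exact int_pos_prime_two_le q hq hq0
    · intro p
      simp only [List.not_mem_nil, false_iff]
      rintro ⟨h1, h2, _, h4⟩
      have := int_pos_prime_two_le p h1 h2
      omega
  have h := factLoop_inv n ((Nat.sqrt n.toNat : Int) - 1).toNat 2 ([], n) le_rfl hinit
  have he : (2 + (((Nat.sqrt n.toNat : Int) - 1).toNat : Int)) = (Nat.sqrt n.toNat : Int) + 1 := by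
    omega
  rw [he] at h
  exact h

lemma plist_props (n : Int) (hn : 3 ≤ n) :
    (∀ p ∈ plist n, Prime p ∧ 0 < p ∧ p ∣ n) ∧
    (∀ q : Int, Prime q → 0 < q → q ∣ n → q ∈ plist n) ∧
    (plist n).Pairwise (fun a b => IsCoprime a b) := by
  obtain ⟨hm0, hmn, hbig, hfind, hmem, hpw⟩ := factorLoop_inv n hn
  set s : Int := (Nat.sqrt n.toNat : Int) with hs
  set m : Int := (factorLoop n).2 with hmdef
  set P0 : List Int := (factorLoop n).1 with hP0
  have hcoP0 : P0.Pairwise (fun a b => IsCoprime a b) := by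
    refine hpw.imp_of_mem ?_
    intro a b ha hb hab
    obtain ⟨ha1, ha2, _, _⟩ := (hmem a).mp ha
    obtain ⟨hb1, hb2, _, _⟩ := (hmem b).mp hb
    exact primes_coprime a b ha1 hb1 ha2 hb2 (by omega)
  by_cases hm1 : m > 1
  · -- m is prime
    have hmabs : 2 ≤ m.natAbs := by omega
    obtain ⟨q, hqp, hqd⟩ := Nat.exists_prime_and_dvd (n := m.natAbs) (by omega)
    have hqd' : (q : Int) ∣ m := by
      have : (q : Int) ∣ (m.natAbs : Int) := Int.natCast_dvd_natCast.mpr hqd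
      rwa [Int.natAbs_of_nonneg (by omega)] at this
    have hqprime : Prime (q : Int) := Int.prime_iff_natAbs_prime.mpr (by simpa using hqp)
    have hqge : s + 1 ≤ (q : Int) := hbig _ hqprime (by exact_mod_cast hqp.pos) hqd'
    have hmn' : m ≤ n := Int.le_of_dvd (by omega) hmn
    have habs_le : m.natAbs ≤ n.toNat := by omega
    have hmq : m.natAbs = q := by
      by_contra hne
      obtain ⟨r, hr⟩ := hqd
      have hr1 : r ≠ 1 := by
        intro h; rw [h, Nat.mul_one] at hr; exact hne hr
      have hr0 : r ≠ 0 := by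
        intro h; rw [h, Nat.mul_zero] at hr; omega
      obtain ⟨q', hq'p, hq'd⟩ := Nat.exists_prime_and_dvd hr1
      have hq'm : (q' : Int) ∣ m := by
        have : (q' : Int) ∣ (m.natAbs : Int) :=
          Int.natCast_dvd_natCast.mpr (hr ▸ (hq'd.mul_left q))
        rwa [Int.natAbs_of_nonneg (by omega)] at this
      have hq'prime : Prime (q' : Int) := Int.prime_iff_natAbs_prime.mpr (by simpa using hq'p)
      have hq'ge : s + 1 ≤ (q' : Int) := hbig _ hq'prime (by exact_mod_cast hq'p.pos) hq'm
      have hrq' : q' ≤ r := Nat.le_of_dvd (by omega) hq'd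
      have hsq : Nat.sqrt n.toNat + 1 ≤ q ∧ Nat.sqrt n.toNat + 1 ≤ q' := by
        constructor <;> omega
      have hlt := Nat.lt_succ_sqrt n.toNat
      have : (Nat.sqrt n.toNat + 1) * (Nat.sqrt n.toNat + 1) ≤ q * r :=
        Nat.mul_le_mul hsq.1 (le_trans hsq.2 hrq')
      rw [← hr] at this
      simp only [Nat.succ_eq_add_one] at hlt
      omega
    have hmprime : Prime m := Int.prime_iff_natAbs_prime.mpr (hmq ▸ hqp)
    have hms : s + 1 ≤ m := hbig m hmprime (by omega) (dvd_refl m)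
    have hplist : plist n = P0 ++ [m] := by
      rw [plist, if_pos hm1]
    rw [hplist]
    refine ⟨?_, ?_, ?_⟩
    · intro p hp
      rcases List.mem_append.mp hp with h | h
      · obtain ⟨h1, h2, h3, _⟩ := (hmem p).mp h
        exact ⟨h1, h2, h3⟩
      · rw [List.mem_singleton] at h
        subst h
        exact ⟨hmprime, by omega, hmn⟩
    · intro q2 hq2 hq20 hq2n
      rcases lt_or_ge q2 (s + 1) with hlt | hge
      · exact List.mem_append.mpr (Or.inl ((hmem q2).mpr ⟨hq2, hq20, hq2n, hlt⟩))
      · have : q2 ∣ m := hfind q2 hq2 hq20 hq2n hge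
        have : q2.natAbs ∣ m.natAbs := Int.natAbs_dvd_natAbs.mpr this
        have heq : q2.natAbs = m.natAbs :=
          (Nat.prime_dvd_prime_iff_eq (Int.prime_iff_natAbs_prime.mp hq2)
            (Int.prime_iff_natAbs_prime.mp hmprime)).mp this
        have : q2 = m := by omega
        subst this
        exact List.mem_append.mpr (Or.inr (List.mem_singleton.mpr rfl))
    · rw [List.pairwise_append]
      refine ⟨hcoP0, List.pairwise_singleton _ _, ?_⟩
      intro a ha b hb
      rw [List.mem_singleton] at hb
      subst hb
      obtain ⟨h1, h2, _, h4⟩ := (hmem a).mp ha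
      exact primes_coprime a m h1 hmprime h2 (by omega) (by omega)
  · -- m = 1
    have hm : m = 1 := by omega
    have hplist : plist n = P0 := by
      rw [plist, if_neg hm1]
    rw [hplist]
    refine ⟨?_, ?_, hcoP0⟩
    · intro p hp
      obtain ⟨h1, h2, h3, _⟩ := (hmem p).mp hp
      exact ⟨h1, h2, h3⟩
    · intro q hq hq0 hqn
      rcases lt_or_ge q (s + 1) with hlt | hge
      · exact (hmem q).mpr ⟨hq, hq0, hqn, hlt⟩
      · have : q ∣ m := hfind q hq hq0 hqn hge
        rw [hm] at this
        have := Int.le_of_dvd one_pos this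
        have := int_pos_prime_two_le q hq hq0
        omega

lemma plist_bridge (n : Int) (hn : 3 ≤ n) (v : Int) :
    (∀ p ∈ plist n, ¬ p ∣ v) ↔ Int.gcd n v = 1 := by
  obtain ⟨hall, hcomp, _⟩ := plist_props n hn
  constructor
  · intro h
    by_contra hg
    have hg0 : Int.gcd n v ≠ 0 := by
      intro h0
      rw [Int.gcd_eq_zero_iff] at h0
      omega
    obtain ⟨q, hqp, hqd⟩ := Nat.exists_prime_and_dvd hg
    have hqn : (q : Int) ∣ n := dvd_trans (Int.natCast_dvd_natCast.mpr hqd) (Int.gcd_dvd_left n v)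
    have hqv : (q : Int) ∣ v := dvd_trans (Int.natCast_dvd_natCast.mpr hqd) (Int.gcd_dvd_right n v)
    have hqprime : Prime (q : Int) := Int.prime_iff_natAbs_prime.mpr (by simpa using hqp)
    exact h _ (hcomp _ hqprime (by exact_mod_cast hqp.pos) hqn) hqv
  · intro hg p hp hpv
    obtain ⟨h1, h2, h3⟩ := hall p hp
    obtain ⟨a, b, hab⟩ := (Int.isCoprime_iff_gcd_eq_one.mpr hg)
    have hp1 : p ∣ 1 := hab ▸ dvd_add (Dvd.dvd.mul_left h3 a) (Dvd.dvd.mul_left hpv b)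
    have := Int.le_of_dvd one_pos hp1
    have := int_pos_prime_two_le p h1 h2
    omega

def gterm (n v : Int) : Int :=
  if Int.gcd n v = 1 then (if 4 * n ≤ 9 * v then 2 else 1) else 0

lemma A_eq_sum (n : Int) (hn : 3 ≤ n) :
    A365876 n
      = ((PySem.List.pyRange 1 (PySem.Int.floordiv (n-1) 2 + 1) 1).map (gterm n)).sum := by
  have hK : (n+1) >>> (1:Nat) = PySem.Int.floordiv (n-1) 2 + 1 := by
    rw [Int.shiftRight_eq_div_pow, PySem.Int.floordiv_eq_ediv_of_pos (by omega)]
    norm_num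
    omega
  have hbody : ∀ (c v : Int), v ∈ PySem.List.pyRange 1 (PySem.Int.floordiv (n-1) 2 + 1) 1 →
      (let u := n - (v <<< (1:Nat))
       if Int.gcd u v = 1 then
         let v2 := v * v
         let u2 := v * (u <<< (2:Nat))
         let c := if v2 + u2 ≥ 0 then c + 1 else c
         if v2 - u2 ≥ 0 then c + 1 else c
       else c) = c + gterm n v := by
    intro c v hv
    rw [PySem.List.mem_pyRange_one] at hv
    have hv1 : 1 ≤ v := hv.1
    have hv2 : v ≤ PySem.Int.floordiv (n-1) 2 := by omega
    rw [PySem.Int.floordiv_eq_ediv_of_pos (by omega)] at hv2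
    have hu : 1 ≤ n - 2 * v := by omega
    have hsh1 : v <<< (1:Nat) = 2 * v := by rw [Int.shiftLeft_eq]; ring
    simp only [hsh1, gterm]
    have hsh2 : (n - 2*v) <<< (2:Nat) = 4 * (n - 2*v) := by rw [Int.shiftLeft_eq]; ring
    simp only [hsh2]
    have hg : Int.gcd (n - 2*v) v = Int.gcd n v := by
      simpa using Int.gcd_add_mul_right_left v (n - 2*v) 2
    rw [hg]
    by_cases hgcd : Int.gcd n v = 1
    · rw [if_pos hgcd, if_pos hgcd]
      have hc1 : v * v + v * (4 * (n - 2*v)) ≥ 0 := by nlinarith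
      rw [if_pos hc1]
      have hc2 : v * v - v * (4 * (n - 2*v)) ≥ 0 ↔ 4 * n ≤ 9 * v := by
        constructor
        · intro h
          have h' : 0 ≤ v * (v - 4 * (n - 2*v)) := by nlinarith
          have := (mul_nonneg_iff_of_pos_left (by omega : (0:Int) < v)).mp h'
          omega
        · intro h; nlinarith
      by_cases h2 : 4 * n ≤ 9 * v
      · rw [if_pos (hc2.mpr h2), if_pos h2]; ring
      · rw [if_neg (fun hc => h2 (hc2.mp hc)), if_neg h2]
    · rw [if_neg hgcd, if_neg hgcd]
      ring
  have key := (PySem.List.foldl_congr_mem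
      (PySem.List.pyRange 1 (PySem.Int.floordiv (n-1) 2 + 1) 1)
      (fun (c v : Int) =>
        let u := n - (v <<< (1:Nat))
        if Int.gcd u v = 1 then
          let v2 := v * v
          let u2 := v * (u <<< (2:Nat))
          let c := if v2 + u2 ≥ 0 then c + 1 else c
          if v2 - u2 ≥ 0 then c + 1 else c
        else c)
      (fun (c v : Int) => c + gterm n v) 0 hbody).trans
    (by rw [PySem.List.foldl_add]; exact zero_add _ :
      (PySem.List.pyRange 1 (PySem.Int.floordiv (n-1) 2 + 1) 1).foldl
        (fun (c v : Int) => c + gterm n v) 0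
      = ((PySem.List.pyRange 1 (PySem.Int.floordiv (n-1) 2 + 1) 1).map (gterm n)).sum)
  rw [A365876, if_neg (by omega : ¬ n = 1), hK]
  exact key

lemma sum_gterm (n : Int) (hn : 3 ≤ n) :
    ((PySem.List.pyRange 1 (PySem.Int.floordiv (n-1) 2 + 1) 1).map (gterm n)).sum
      = 2 * cntF (plist n) (PySem.Int.floordiv (n-1) 2)
        - cntF (plist n) (PySem.Int.floordiv (4*n-1) 9) := by
  set hi : Int := PySem.Int.floordiv (n-1) 2 with hhi
  set lo : Int := PySem.Int.floordiv (4*n-1) 9 with hlo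
  have hhi' : hi = (n-1) / 2 := PySem.Int.floordiv_eq_ediv_of_pos (by omega)
  have hlo' : lo = (4*n-1) / 9 := PySem.Int.floordiv_eq_ediv_of_pos (by omega)
  have hlo1 : 1 ≤ lo := by omega
  have hlohi : lo ≤ hi := by omega
  -- list sum to Finset sum
  have hfin : (PySem.List.pyRange 1 (hi + 1) 1).toFinset = Finset.Icc 1 hi := by
    ext v
    rw [List.mem_toFinset, PySem.List.mem_pyRange_one, Finset.mem_Icc]
    omega
  have hsum : ((PySem.List.pyRange 1 (hi + 1) 1).map (gterm n)).sum
      = ∑ v ∈ Finset.Icc 1 hi, gterm n v := by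
    rw [← hfin, List.sum_toFinset _ (PySem.List.nodup_pyRange_one 1 (hi+1))]
  rw [hsum]
  -- split gterm into two indicators
  have hsplit : ∑ v ∈ Finset.Icc 1 hi, gterm n v
      = (∑ v ∈ Finset.Icc 1 hi, if Int.gcd n v = 1 then (1:Int) else 0)
        + ∑ v ∈ Finset.Icc 1 hi, if Int.gcd n v = 1 ∧ 4 * n ≤ 9 * v then (1:Int) else 0 := by
    rw [← Finset.sum_add_distrib]
    apply Finset.sum_congr rfl
    intro v _
    rw [gterm]
    by_cases h1 : Int.gcd n v = 1 <;> by_cases h2 : 4 * n ≤ 9 * v <;>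
      simp [h1, h2]
  rw [hsplit]
  -- first sum
  have hs1 : (∑ v ∈ Finset.Icc 1 hi, if Int.gcd n v = 1 then (1:Int) else 0)
      = cntF (plist n) hi := by
    rw [Finset.sum_boole, cntF, iccZ_eq]
    have heq : (Finset.Icc 1 hi).filter (fun v => Int.gcd n v = 1)
        = (Finset.Icc 1 hi).filter (fun v => ∀ p ∈ plist n, ¬ p ∣ v) := by
      apply Finset.filter_congr
      intro v _
      exact (plist_bridge n hn v).symm
    rw [heq]
  -- second sum
  have hs2 : (∑ v ∈ Finset.Icc 1 hi, if Int.gcd n v = 1 ∧ 4 * n ≤ 9 * v then (1:Int) else 0)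
      = cntF (plist n) hi - cntF (plist n) lo := by
    rw [Finset.sum_boole]
    have hfilt : (Finset.Icc 1 hi).filter (fun v => Int.gcd n v = 1 ∧ 4 * n ≤ 9 * v)
        = (Finset.Ioc lo hi).filter (fun v => ∀ p ∈ plist n, ¬ p ∣ v) := by
      ext v
      simp only [Finset.mem_filter, Finset.mem_Icc, Finset.mem_Ioc]
      rw [← plist_bridge n hn v]
      constructor
      · rintro ⟨⟨h1, h2⟩, h3, h4⟩
        exact ⟨⟨by omega, h2⟩, h3⟩
      · rintro ⟨⟨h1, h2⟩, h3⟩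
        exact ⟨⟨by omega, h2⟩, h3, by omega⟩
    have hunion : Finset.Icc 1 hi = Finset.Icc 1 lo ∪ Finset.Ioc lo hi := by
      ext v
      simp only [Finset.mem_union, Finset.mem_Icc, Finset.mem_Ioc]
      omega
    have hdisj : Disjoint ((Finset.Icc 1 lo).filter (fun v => ∀ p ∈ plist n, ¬ p ∣ v))
        ((Finset.Ioc lo hi).filter (fun v => ∀ p ∈ plist n, ¬ p ∣ v)) := by
      rw [Finset.disjoint_left]
      intro a ha hb
      simp only [Finset.mem_filter, Finset.mem_Icc, Finset.mem_Ioc] at ha hb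
      omega
    have hcard : cntF (plist n) hi
        = cntF (plist n) lo
          + (((Finset.Ioc lo hi).filter (fun v => ∀ p ∈ plist n, ¬ p ∣ v)).card : Int) := by
      simp only [cntF, iccZ_eq]
      rw [hunion, Finset.filter_union, Finset.card_union_of_disjoint hdisj]
      push_cast
      ring
    rw [hfilt, hcard]
    ring
  rw [hs1, hs2]
  ring


-- ===== VERDICT (by name: the statement is the Claim_ definition above) =====
theorem A365876_spec : Claim_equal_A365876 := by
  intro n _
  unfold Spec_A365876
  by_cases h1 : n = 1
  · subst h1; rfl
  · by_cases h2 : n ≤ 2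
    · have hK : (n+1) >>> (1:Nat) ≤ 1 := by
        rw [Int.shiftRight_eq_div_pow]
        norm_num
        omega
      rw [A365876, if_neg h1, PySem.List.pyRange_one_eq_nil hK,
        A365876_alt, if_neg h1, if_pos h2]
      rfl
    · have hn : 3 ≤ n := by omega
      have hprops := plist_props n hn
      have hpos : ∀ p ∈ plist n, 0 < p := fun p hp => (hprops.1 p hp).2.1
      have hcop := cop_eq_cntF (plist n) hpos hprops.2.2
      have halt : A365876_alt n
          = 2 * cop (PySem.Int.floordiv (n-1) 2) (plist n)
            - cop (PySem.Int.floordiv (4*n-1) 9) (plist n) := by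
        rw [A365876_alt, if_neg h1, if_neg h2]
        rfl
      rw [A_eq_sum n hn, sum_gterm n hn, halt, hcop, hcop]
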